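-- pv_equiv track=rewrite | github.com/floatint/TasksOOP | Task_1_21/utils.py | splitnumbers
-- ===== SOURCE A (Python) =====
-- def splitnumbers(delimiter, str):
--     newlist = []
--     tmp = ''
--
--     for c in str:
--         if c == delimiter:
--             if len(tmp) == 0:
--                 continue
--             else:
--                 newlist.append(int(tmp))
--                 tmp = ''
--         else:
--             tmp += c
--     """for i, c in enumerate(str):
--         if str[i] == delimiter:
--             if len(tmp) == 0:
--                 continue
--             else:
--                 newlist.append(int(tmp))
--                 tmp = ''
--         else:
--             tmp += c"""
--     if len(tmp) != 0:
--         newlist.append(int(tmp))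
--         tmp = ''
--
--     if len(newlist) == 0:
--         return None
--     else:
--         return newlist
-- ===== SOURCE B (Python) =====
-- def splitnumbers(delimiter, str):
--     # Two-pointer run scanner: skip delimiter chars, slice out each maximal
--     # non-delimiter run and convert it with int().
--     nums = []
--     i, n = 0, len(str)
--     while i < n:
--         if str[i] == delimiter:
--             i += 1
--             continue
--         j = i
--         while j < n and str[j] != delimiter:
--             j += 1
--         nums.append(int(str[i:j]))
--         i = j
--     return nums if nums else None
-- ===== Notes on version B (the rewrite author's own statement) =====
-- stated objective: alternative
-- what changed: Replaces A's char-by-char accumulator (building tmp one character at a time with flush-on-delimiter and a final flush) by an index-based two-pointer run scanner that slices out each maximal non-delimiter run and converts it directly.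
import Mathlib
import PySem

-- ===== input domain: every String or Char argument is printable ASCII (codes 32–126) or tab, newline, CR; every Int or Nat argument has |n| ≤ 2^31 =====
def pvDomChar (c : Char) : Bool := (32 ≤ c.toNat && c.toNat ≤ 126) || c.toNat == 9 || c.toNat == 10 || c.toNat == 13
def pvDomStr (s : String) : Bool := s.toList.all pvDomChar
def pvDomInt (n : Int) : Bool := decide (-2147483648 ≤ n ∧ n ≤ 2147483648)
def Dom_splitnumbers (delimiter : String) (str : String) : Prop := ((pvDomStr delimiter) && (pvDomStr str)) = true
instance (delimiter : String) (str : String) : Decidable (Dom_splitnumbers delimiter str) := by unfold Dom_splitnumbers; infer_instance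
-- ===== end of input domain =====

-- B replaces A's char-by-char accumulator with a two-pointer run scanner over maximal
-- non-delimiter runs (objective: alternative decomposition, same cost); return value only.

-- ===== PORT A =====
-- In Python `c == delimiter` compares the 1-char string c with delimiter.
def pvIsDelim (delimiter : String) (c : Char) : Bool := delimiter == String.mk [c]

-- int(tmp); where Python int() raises ValueError the input is outside Pre_, .getD 0 is a placeholder there
def pvInt (t : List Char) : Int := (PySem.Int.ofChars? t).getD 0

-- the for-loop of A, carrying (newlist, tmp)
def pvLoopA (delimiter : String) (newlist : List Int) (tmp : List Char) : List Char → List Int × List Char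
  | [] => (newlist, tmp)
  | c :: cs =>
      if pvIsDelim delimiter c then
        if tmp.length == 0 then pvLoopA delimiter newlist tmp cs
        else pvLoopA delimiter (newlist ++ [pvInt tmp]) [] cs
      else pvLoopA delimiter newlist (tmp ++ [c]) cs

def splitnumbers (delimiter : String) (str : String) : Option (List Int) :=
  let st := pvLoopA delimiter [] [] str.toList
  let newlist := if st.2.length ≠ 0 then st.1 ++ [pvInt st.2] else st.1
  if newlist.length == 0 then none else some newlist

-- ===== PORT B =====
-- the run scanner of Source B: skip a delimiter char, else slice out the maximal
-- non-delimiter run (the inner `while j < n and str[j] != delimiter` / `str[i:j]`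
-- is exactly takeWhile/dropWhile of non-delimiter chars) and continue after it
def pvRuns (delimiter : String) : List Char → List (List Char)
  | [] => []
  | c :: cs =>
      if pvIsDelim delimiter c then pvRuns delimiter cs
      else (c :: cs.takeWhile (fun d => !pvIsDelim delimiter d)) ::
           pvRuns delimiter (cs.dropWhile (fun d => !pvIsDelim delimiter d))
  termination_by cs => cs.length
  decreasing_by
    all_goals
      have := List.length_dropWhile_le (p := fun d => !pvIsDelim delimiter d) (l := cs)
      simp
      try omega

def splitnumbers_alt (delimiter : String) (str : String) : Option (List Int) :=
  let nums := (pvRuns delimiter str.toList).map pvInt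
  if nums.isEmpty then none else some nums

-- ===== PRECONDITION & SPEC =====
-- Pre_ excludes exactly the inputs where some nonempty chunk between delimiter characters
-- is not a valid Python int literal: there A (and B) raise ValueError instead of returning.
def Pre_splitnumbers (delimiter : String) (str : String) : Prop :=
  ∀ t ∈ (str.toList.splitOnP (pvIsDelim delimiter)).filter (fun t => !t.isEmpty),
    (PySem.Int.ofChars? t).isSome = true
instance (delimiter : String) (str : String) : Decidable (Pre_splitnumbers delimiter str) := by
  unfold Pre_splitnumbers; infer_instance

def pvWitness_splitnumbers : String × String := (",", "1,,22, -3")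

def Spec_splitnumbers (delimiter : String) (str : String) (out : Option (List Int)) : Prop := out = splitnumbers_alt delimiter str
instance (delimiter : String) (str : String) (out : Option (List Int)) : Decidable (Spec_splitnumbers delimiter str out) := by unfold Spec_splitnumbers; infer_instance

-- ===== CLAIM (what is proved, stated in full; the proofs are below) =====
def Claim_equal_splitnumbers : Prop := ∀ (delimiter : String) (str : String), Dom_splitnumbers delimiter str → Pre_splitnumbers delimiter str → Spec_splitnumbers delimiter str (splitnumbers delimiter str)

-- ===== LEMMAS AND PROOFS =====

-- runs of a delimiter-free list
theorem pvRuns_free (delimiter : String) (tmp : List Char)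
    (h : ∀ x ∈ tmp, pvIsDelim delimiter x = false) :
    pvRuns delimiter tmp = if tmp = [] then [] else [tmp] := by
  cases tmp with
  | nil => simp [pvRuns]
  | cons c cs =>
      have hc := h c (by simp)
      rw [pvRuns]
      have ht : cs.takeWhile (fun d => !pvIsDelim delimiter d) = cs :=
        List.takeWhile_eq_self_iff.mpr (by intro x hx; simp [h x (by simp [hx])])
      have hd : cs.dropWhile (fun d => !pvIsDelim delimiter d) = [] :=
        List.dropWhile_eq_nil_iff.mpr (by intro x hx; simp [h x (by simp [hx])])
      simp [hc, ht, hd, pvRuns]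

-- a nonempty delimiter-free prefix followed by a delimiter is the first run
theorem pvRuns_prefix (delimiter : String) (tmp : List Char) (c : Char) (cs : List Char)
    (hne : tmp ≠ []) (h : ∀ x ∈ tmp, pvIsDelim delimiter x = false)
    (hc : pvIsDelim delimiter c = true) :
    pvRuns delimiter (tmp ++ c :: cs) = tmp :: pvRuns delimiter cs := by
  cases tmp with
  | nil => exact absurd rfl hne
  | cons t ts =>
      have ht := h t (by simp)
      rw [List.cons_append, pvRuns]
      have htw : (ts ++ c :: cs).takeWhile (fun d => !pvIsDelim delimiter d) = ts := by
        rw [List.takeWhile_append]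
        have : ts.takeWhile (fun d => !pvIsDelim delimiter d) = ts :=
          List.takeWhile_eq_self_iff.mpr (by intro x hx; simp [h x (by simp [hx])])
        simp [this, List.takeWhile, hc]
      have hdw : (ts ++ c :: cs).dropWhile (fun d => !pvIsDelim delimiter d) = c :: cs := by
        rw [List.dropWhile_append]
        have : ts.dropWhile (fun d => !pvIsDelim delimiter d) = [] :=
          List.dropWhile_eq_nil_iff.mpr (by intro x hx; simp [h x (by simp [hx])])
        simp [this, List.dropWhile, hc]
      simp [ht, htw, hdw, pvRuns, hc]

-- loop invariant: A's loop plus final flush produces acc ++ map pvInt (runs of tmp ++ rest)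
theorem pvLoopA_runs (delimiter : String) (cs : List Char) :
    ∀ (acc : List Int) (tmp : List Char),
    (∀ x ∈ tmp, pvIsDelim delimiter x = false) →
    (let st := pvLoopA delimiter acc tmp cs
     (if st.2.length ≠ 0 then st.1 ++ [pvInt st.2] else st.1))
      = acc ++ (pvRuns delimiter (tmp ++ cs)).map pvInt := by
  induction cs with
  | nil =>
      intro acc tmp h
      simp only [pvLoopA, List.append_nil]
      rw [pvRuns_free delimiter tmp h]
      cases tmp <;> simp
  | cons c cs ih =>
      intro acc tmp h
      by_cases hc : pvIsDelim delimiter c = true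
      · cases tmp with
        | nil =>
            simpa [pvLoopA, hc, pvRuns] using ih acc [] (by simp)
        | cons t ts =>
            have := ih (acc ++ [pvInt (t :: ts)]) [] (by simp)
            rw [pvRuns_prefix delimiter (t :: ts) c cs (by simp) h hc]
            simp only [pvLoopA, hc, if_pos, List.length_cons] at *
            simpa using this
      · have hc' : pvIsDelim delimiter c = false := by simpa using hc
        have := ih acc (tmp ++ [c]) (by
          intro x hx
          rcases List.mem_append.mp hx with h1 | h1
          · exact h x h1
          · simp at h1; simp [h1, hc'])
        simp only [pvLoopA, hc', List.append_assoc, List.singleton_append] at *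
        simpa using this

-- ===== VERDICT (by name: the statement is the Claim_ definition above) =====
theorem splitnumbers_spec : Claim_equal_splitnumbers := by
  intro delimiter str _ _
  unfold Spec_splitnumbers splitnumbers splitnumbers_alt
  have h := pvLoopA_runs delimiter str.toList [] [] (by simp)
  simp only [List.nil_append] at h
  simp only [h, List.isEmpty_iff]
  rcases hm : (pvRuns delimiter str.toList).map pvInt with _ | ⟨x, xs⟩ <;> simp
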